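-- pv_equiv track=rewrite | github.com/00-team/simurgh | shared/validators.py | slug_validator
-- ===== SOURCE A (Python) =====
-- import string
--
-- def slug_validator(value: str):
--     value = str(value)
--
--     if not value:
--         raise ValueError('slug connot be empty')
--
--     value = value[:255]
--
--     for c in value:
--         if c not in string.ascii_letters + string.digits + '-_':
--             raise ValueError(f'invalid character {c} in slug')
--
--     return value
-- ===== SOURCE B (Python) =====
-- import re
--
-- def slug_validator(value: str):
--     value = str(value)
--
--     if not value:
--         raise ValueError('slug connot be empty')
--
--     value = value[:255]
--
--     m = re.search(r'[^A-Za-z0-9_-]', value)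
--     if m is not None:
--         raise ValueError(f'invalid character {m.group()} in slug')
--
--     return value
-- ===== Notes on version B (the rewrite author's own statement) =====
-- stated objective: idiomatic
-- what changed: The explicit per-character loop with a 64-character membership test is replaced by a single re.search for the first character outside [A-Za-z0-9_-], delegating the scan to the regex engine.
import Mathlib
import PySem

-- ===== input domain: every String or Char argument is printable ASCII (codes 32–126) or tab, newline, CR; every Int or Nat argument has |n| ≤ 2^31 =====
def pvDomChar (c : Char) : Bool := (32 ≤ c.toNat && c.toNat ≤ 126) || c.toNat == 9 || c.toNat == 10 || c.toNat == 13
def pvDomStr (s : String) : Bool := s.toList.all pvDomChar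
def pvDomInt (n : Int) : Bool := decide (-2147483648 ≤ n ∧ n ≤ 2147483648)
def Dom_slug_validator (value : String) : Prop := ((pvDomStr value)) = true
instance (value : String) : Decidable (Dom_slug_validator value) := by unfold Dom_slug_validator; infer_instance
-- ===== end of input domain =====

-- B replaces A's per-character membership loop by a single search for the first
-- character outside the allowed class (re.search in Python, List.find? here): idiomatic, same cost.


-- ===== PORT A =====
-- string.ascii_letters + string.digits + '-_'
def slugAllowedA : String :=
  "abcdefghijklmnopqrstuvwxyzABCDEFGHIJKLMNOPQRSTUVWXYZ0123456789-_"

-- the 'for c in value' loop; a raise is modelled as "" (such inputs are outside Pre_)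
def slugLoopA : List Char → String → String
  | [], v => v
  | c :: cs, v =>
      if slugAllowedA.toList.contains c then slugLoopA cs v
      else ""  -- raise ValueError(f'invalid character {c} in slug')

def slug_validator (value : String) : String :=
  if value = "" then ""  -- raise ValueError('slug connot be empty')
  else
    let v := PySem.Str.slice value none (some 255)
    slugLoopA v.toList v

-- ===== PORT B =====
-- the regex class [^A-Za-z0-9_-] as a character predicate
def slugBadB (c : Char) : Bool :=
  !(('A' ≤ c && c ≤ 'Z') || ('a' ≤ c && c ≤ 'z') || ('0' ≤ c && c ≤ '9') || c == '_' || c == '-')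

def slug_validator_alt (value : String) : String :=
  if value = "" then ""  -- raise ValueError('slug connot be empty')
  else
    let v := PySem.Str.slice value none (some 255)
    match v.toList.find? slugBadB with  -- m = re.search(r'[^A-Za-z0-9_-]', value)
    | some _ => ""  -- raise ValueError(f'invalid character {m.group()} in slug')
    | none => v

-- ===== PRECONDITION & SPEC =====
-- A raises ValueError on the empty string and on any string whose first 255 characters
-- contain a character outside [A-Za-z0-9_-]; exactly those inputs are excluded.
def Pre_slug_validator (value : String) : Prop :=
  value ≠ "" ∧ ((value.toList.take 255).all (fun c => slugAllowedA.toList.contains c)) = true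
instance (value : String) : Decidable (Pre_slug_validator value) := by
  unfold Pre_slug_validator; infer_instance

def pvWitness_slug_validator : String := "My-slug_01"

def Spec_slug_validator (value : String) (out : String) : Prop := out = slug_validator_alt value
instance (value : String) (out : String) : Decidable (Spec_slug_validator value out) := by
  unfold Spec_slug_validator; infer_instance

-- ===== CLAIM (what is proved, stated in full; the proofs are below) =====
def Claim_equal_slug_validator : Prop :=
  ∀ (value : String), Dom_slug_validator value → Pre_slug_validator value →
    Spec_slug_validator value (slug_validator value)

-- ===== LEMMAS AND PROOFS =====
lemma slugLoopA_of_all {l : List Char} (v : String)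
    (h : ∀ c ∈ l, slugAllowedA.toList.contains c = true) : slugLoopA l v = v := by
  induction l with
  | nil => rfl
  | cons c cs ih =>
      simp only [slugLoopA, h c (List.mem_cons_self ..), if_true]
      exact ih fun d hd => h d (List.mem_cons_of_mem _ hd)

lemma slugBadB_false_of_allowed : ∀ c ∈ slugAllowedA.toList, slugBadB c = false := by
  have h : slugAllowedA.toList.all (fun c => !slugBadB c) = true := by rfl
  intro c hc
  simpa using List.all_eq_true.mp h c hc

lemma slice_toList (value : String) :
    (PySem.Str.slice value none (some 255)).toList = value.toList.take 255 := by
  rw [PySem.Str.toList_slice]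
  simp only [PySem.Chars.slice_eq_listSlice]
  rw [PySem.List.slice_to _ (by norm_num)]
  rfl

-- ===== VERDICT (by name: the statement is the Claim_ definition above) =====
theorem slug_validator_spec : Claim_equal_slug_validator := by
  intro value _ hpre
  obtain ⟨hne, hall⟩ := hpre
  unfold Spec_slug_validator slug_validator slug_validator_alt
  rw [if_neg hne, if_neg hne]
  have hlist := slice_toList value
  have hA : slugLoopA (PySem.Str.slice value none (some 255)).toList
      (PySem.Str.slice value none (some 255)) = PySem.Str.slice value none (some 255) := by
    apply slugLoopA_of_all
    intro c hc
    rw [hlist] at hc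
    exact List.all_eq_true.mp hall c hc
  have hB : (PySem.Str.slice value none (some 255)).toList.find? slugBadB = none := by
    rw [List.find?_eq_none]
    intro c hc
    rw [hlist] at hc
    have := List.all_eq_true.mp hall c hc
    simp [slugBadB_false_of_allowed c (List.mem_of_elem_eq_true this)]
  simp only [hA, hB]
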